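-- pv_equiv track=rewrite | github.com/Momentum-PT-Team-3/py-mystery-word-arieljsmith | mystery-word-game.py | split_by_difficulty
-- ===== SOURCE A (Python) =====
-- def split_by_difficulty(word_list):
--     """
--     Function that takes a list of words and sorts that list into three
--     groups (easy, normal, or hard) depending on the length of each word.
--
--     :param word_list: list - list of words computer can choose from
--     :return easy_words: list - list of words between 1-5 characters
--     :return normal_words: list - list of words between 6-8 characters
--     :return hard_words: list - list of words of 9 or more characters
--     """
--     easy_words, normal_words, hard_words = [], [], []
--
--     for word in word_list:
--         if len(word) <= 5:
--             easy_words.append(word)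
--         elif 5 < len(word) <= 8:
--             normal_words.append(word)
--         else:
--             hard_words.append(word)
--
--     return easy_words, normal_words, hard_words
-- ===== SOURCE B (Python) =====
-- def split_by_difficulty(word_list):
--     easy_words = [w for w in word_list if len(w) <= 5]
--     normal_words = [w for w in word_list if 6 <= len(w) <= 8]
--     hard_words = [w for w in word_list if len(w) >= 9]
--     return easy_words, normal_words, hard_words
-- ===== Notes on version B (the rewrite author's own statement) =====
-- stated objective: idiomatic
-- what changed: Replaced the single three-way-branching accumulator loop with three independent filter passes, one per difficulty bucket.
import Mathlib
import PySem

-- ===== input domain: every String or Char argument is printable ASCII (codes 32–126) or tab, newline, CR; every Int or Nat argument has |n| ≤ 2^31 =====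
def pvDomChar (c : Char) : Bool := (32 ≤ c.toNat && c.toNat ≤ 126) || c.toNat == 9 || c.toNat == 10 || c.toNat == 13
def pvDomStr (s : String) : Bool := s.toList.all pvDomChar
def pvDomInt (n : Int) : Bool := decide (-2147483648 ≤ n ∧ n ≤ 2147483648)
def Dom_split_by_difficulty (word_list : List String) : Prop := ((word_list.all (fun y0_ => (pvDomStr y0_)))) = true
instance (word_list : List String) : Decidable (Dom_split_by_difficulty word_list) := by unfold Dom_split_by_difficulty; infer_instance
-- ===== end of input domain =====

-- B replaces A's single branching loop by three independent filter passes (idiomatic decomposition; same cost).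

-- ===== PORT A =====
-- A: one pass with a three-way branch, appending to one of three accumulators (loop body as a helper).
def splitStep (acc : List String × List String × List String) (word : String) :
    List String × List String × List String :=
  let (easy_words, normal_words, hard_words) := acc
  if (PySem.Str.len word) ≤ 5 then
    (easy_words ++ [word], normal_words, hard_words)
  else if 5 < (PySem.Str.len word) ∧ (PySem.Str.len word) ≤ 8 then
    (easy_words, normal_words ++ [word], hard_words)
  else
    (easy_words, normal_words, hard_words ++ [word])

def split_by_difficulty (word_list : List String) : List String × List String × List String :=
  word_list.foldl splitStep ([], [], [])

-- ===== PORT B =====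
-- B: three filter passes, one per bucket.
def split_by_difficulty_alt (word_list : List String) : List String × List String × List String :=
  (word_list.filter (fun w => (PySem.Str.len w) ≤ 5),
   word_list.filter (fun w => 6 ≤ (PySem.Str.len w) ∧ (PySem.Str.len w) ≤ 8),
   word_list.filter (fun w => 9 ≤ (PySem.Str.len w)))

-- ===== PRECONDITION & SPEC =====
def Spec_split_by_difficulty (word_list : List String) (out : List String × List String × List String) : Prop := out = split_by_difficulty_alt word_list
instance (word_list : List String) (out : List String × List String × List String) : Decidable (Spec_split_by_difficulty word_list out) := by unfold Spec_split_by_difficulty; infer_instance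

-- ===== CLAIM (what is proved, stated in full; the proofs are below) =====
def Claim_equal_split_by_difficulty : Prop := ∀ (word_list : List String), Dom_split_by_difficulty word_list → Spec_split_by_difficulty word_list (split_by_difficulty word_list)

-- ===== LEMMAS AND PROOFS =====

-- Generalized loop invariant: the fold starting from (e, n, h) appends the three filters.
theorem split_fold_inv (word_list : List String) (e n h : List String) :
    word_list.foldl splitStep (e, n, h)
    = (e ++ word_list.filter (fun w => (PySem.Str.len w) ≤ 5),
       n ++ word_list.filter (fun w => 6 ≤ (PySem.Str.len w) ∧ (PySem.Str.len w) ≤ 8),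
       h ++ word_list.filter (fun w => 9 ≤ (PySem.Str.len w))) := by
  induction word_list generalizing e n h with
  | nil => simp
  | cons w ws ih =>
    have hl : PySem.Str.len w = (w.length : Int) := PySem.Str.len_eq w
    simp only [List.foldl_cons, List.filter_cons, splitStep, hl, decide_eq_true_eq]
    split_ifs
    all_goals try (exfalso; omega)
    all_goals rw [ih]
    all_goals simp

-- ===== VERDICT (by name: the statement is the Claim_ definition above) =====
theorem split_by_difficulty_spec : Claim_equal_split_by_difficulty := by
  intro word_list _
  unfold Spec_split_by_difficulty split_by_difficulty split_by_difficulty_alt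
  simpa using split_fold_inv word_list [] [] []
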